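-- pv_equiv track=rewrite | github.com/YimingZhao-art/Leetcode-records | 1. 1-D Array (19:19)/042. Trapping Rain Water/trapWater.py | countLayer1
-- ===== SOURCE A (Python) =====
-- from typing import List
--
-- def countLayer1(height: List[int], unitDepth: int) -> int:
-- 	count = 0
-- 	if len(height) < 2:
-- 		return 0
-- 	i, j = 0, 0
-- 	while i < len(height) and height[i] < 1:
-- 		i += 1
-- 	j += 1
-- 	while j < len(height):
-- 		while i < len(height)-1 and height[i+1] > 0:
-- 			i += 1
-- 		j = i + 1
--
-- 		while j < len(height) and height[j] < 1:
-- 			j += 1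
-- 		if j >= len(height) or height[j] < 1:
-- 			return count
-- 		else:
-- 			count += (j-i-1)*unitDepth
-- 			i = j
-- 			j = i + 1
--
--
-- 	return count
-- ===== SOURCE B (Python) =====
-- def countLayer1(height, unitDepth):
--     walls = [i for i in range(len(height)) if height[i] >= 1]
--     if len(walls) < 2:
--         return 0
--     return (walls[-1] - walls[0] - (len(walls) - 1)) * unitDepth
-- ===== Notes on version B (the rewrite author's own statement) =====
-- stated objective: simpler
-- what changed: Replaced the nested two-pointer run/valley scan with one comprehension collecting wall indices and a closed arithmetic formula (last - first - (walls-1)) * unitDepth.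
import Mathlib
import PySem

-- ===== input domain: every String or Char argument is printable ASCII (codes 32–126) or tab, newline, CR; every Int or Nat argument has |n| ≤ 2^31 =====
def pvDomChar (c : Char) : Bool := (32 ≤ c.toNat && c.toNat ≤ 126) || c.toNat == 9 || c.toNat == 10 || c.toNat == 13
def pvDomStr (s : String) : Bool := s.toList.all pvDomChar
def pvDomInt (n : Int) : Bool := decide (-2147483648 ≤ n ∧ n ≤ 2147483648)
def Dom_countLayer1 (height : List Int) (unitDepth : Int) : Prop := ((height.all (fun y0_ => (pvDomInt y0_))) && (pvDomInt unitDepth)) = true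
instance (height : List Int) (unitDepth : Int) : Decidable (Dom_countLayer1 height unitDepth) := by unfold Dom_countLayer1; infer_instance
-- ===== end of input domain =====

-- B replaces A's nested two-pointer run/valley scan by a wall-index list and a closed formula; objective: simpler.

-- ===== PORT A =====
-- `while i < len(height) and height[i] < 1: i += 1` (also the inner valley scan, same shape)
def pySkipLow (h : List Int) (i : Nat) : Nat :=
  if hc : i < h.length ∧ h.getD i 0 < 1 then pySkipLow h (i + 1) else i
termination_by h.length - i
decreasing_by omega

-- `while i < len(height)-1 and height[i+1] > 0: i += 1`
def pyRunEnd (h : List Int) (i : Nat) : Nat :=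
  if hc : i + 1 < h.length ∧ 0 < h.getD (i + 1) 0 then pyRunEnd h (i + 1) else i
termination_by h.length - i
decreasing_by omega

-- needed before pyOuter for its termination proof
theorem pySkipLow_ge (h : List Int) (i : Nat) : i ≤ pySkipLow h i := by
  fun_induction pySkipLow h i with
  | case1 i hc ih => omega
  | case2 i hc => omega

theorem pyRunEnd_ge (h : List Int) (i : Nat) : i ≤ pyRunEnd h i := by
  fun_induction pyRunEnd h i with
  | case1 i hc ih => omega
  | case2 i hc => omega

-- the outer `while j < len(height): ...` loop of A, state (count, i, j);
-- `i'` of an iteration is pyRunEnd h i and the new `j` is pySkipLow h (i' + 1)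
def pyOuter (h : List Int) (u : Int) (count : Int) (i j : Nat) : Int :=
  if j < h.length then
    if hc : h.length ≤ pySkipLow h (pyRunEnd h i + 1) ∨ h.getD (pySkipLow h (pyRunEnd h i + 1)) 0 < 1 then
      count
    else
      pyOuter h u
        (count + ((pySkipLow h (pyRunEnd h i + 1) : Int) - (pyRunEnd h i : Int) - 1) * u)
        (pySkipLow h (pyRunEnd h i + 1)) (pySkipLow h (pyRunEnd h i + 1) + 1)
  else count
termination_by h.length - i
decreasing_by
  have h1 := pyRunEnd_ge h i
  have h2 := pySkipLow_ge h (pyRunEnd h i + 1)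
  simp only [not_or, not_le] at hc
  omega

def countLayer1 (height : List Int) (unitDepth : Int) : Int :=
  if height.length < 2 then 0
  else pyOuter height unitDepth 0 (pySkipLow height 0) 1

-- ===== PORT B =====
def countLayer1_alt (height : List Int) (unitDepth : Int) : Int :=
  let walls := (List.range height.length).filter (fun i => decide (1 ≤ height.getD i 0))
  if walls.length < 2 then 0
  else ((walls.getLastD 0 : Int) - (walls.headD 0 : Int) - ((walls.length : Int) - 1)) * unitDepth

-- ===== PRECONDITION & SPEC =====
def Spec_countLayer1 (height : List Int) (unitDepth : Int) (out : Int) : Prop := out = countLayer1_alt height unitDepth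
instance (height : List Int) (unitDepth : Int) (out : Int) : Decidable (Spec_countLayer1 height unitDepth out) := by unfold Spec_countLayer1; infer_instance

-- ===== CLAIM (what is proved, stated in full; the proofs are below) =====
def Claim_equal_countLayer1 : Prop := ∀ (height : List Int) (unitDepth : Int), Dom_countLayer1 height unitDepth → Spec_countLayer1 height unitDepth (countLayer1 height unitDepth)

-- ===== LEMMAS AND PROOFS =====

-- number of non-wall positions above i that still have a wall above them
def pvN (h : List Int) (i : Nat) : Nat :=
  (List.range h.length).countP
    (fun p => decide (i < p ∧ h.getD p 0 < 1 ∧ ∃ q, q < h.length ∧ p < q ∧ 1 ≤ h.getD q 0))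

theorem pySkipLow_le (h : List Int) (i : Nat) (hi : i ≤ h.length) : pySkipLow h i ≤ h.length := by
  fun_induction pySkipLow h i with
  | case1 i hc ih => exact ih (by omega)
  | case2 i hc => exact hi

theorem pySkipLow_low (h : List Int) (i : Nat) :
    ∀ p, i ≤ p → p < pySkipLow h i → h.getD p 0 < 1 := by
  fun_induction pySkipLow h i with
  | case1 i hc ih =>
    intro p h1 h2
    rcases Nat.eq_or_lt_of_le h1 with rfl | h1'
    · exact hc.2
    · exact ih p (by omega) h2
  | case2 i hc => intro p h1 h2; omega

theorem pySkipLow_wall (h : List Int) (i : Nat) (hlt : pySkipLow h i < h.length) :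
    1 ≤ h.getD (pySkipLow h i) 0 := by
  fun_induction pySkipLow h i with
  | case1 i hc ih => exact ih hlt
  | case2 i hc =>
    simp only [not_and, not_lt] at hc
    exact hc hlt

theorem pySkipLow_id (h : List Int) (i : Nat) (hi : h.length ≤ i) : pySkipLow h i = i := by
  rw [pySkipLow, dif_neg (by omega : ¬(i < h.length ∧ h.getD i 0 < 1))]

theorem pyRunEnd_lt (h : List Int) (i : Nat) (hi : i < h.length) : pyRunEnd h i < h.length := by
  fun_induction pyRunEnd h i with
  | case1 i hc ih => exact ih (by omega)
  | case2 i hc => exact hi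

theorem pyRunEnd_wall (h : List Int) (i : Nat) :
    ∀ p, i < p → p ≤ pyRunEnd h i → 0 < h.getD p 0 := by
  fun_induction pyRunEnd h i with
  | case1 i hc ih =>
    intro p h1 h2
    rcases Nat.eq_or_lt_of_le (by omega : i + 1 ≤ p) with rfl | h1'
    · exact hc.2
    · exact ih p (by omega) h2
  | case2 i hc =>
    intro p h1 h2; omega

theorem pyRunEnd_id (h : List Int) (i : Nat) (hi : h.length ≤ i) : pyRunEnd h i = i := by
  rw [pyRunEnd, dif_neg (by omega : ¬(i + 1 < h.length ∧ 0 < h.getD (i + 1) 0))]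

-- counting an interval inside `range n`
theorem countP_range_Ico (n a b : Nat) (hb : b ≤ n) :
    (List.range n).countP (fun p => decide (a ≤ p ∧ p < b)) = b - a := by
  induction n generalizing b with
  | zero => simp; omega
  | succ n ih =>
    rw [List.range_succ, List.countP_append]
    rcases Nat.lt_or_ge b (n + 1) with hb' | hb'
    · have h1 : (List.range n).countP (fun p => decide (a ≤ p ∧ p < b)) = b - a :=
        ih b (by omega)
      have h2 : ([n].countP (fun p => decide (a ≤ p ∧ p < b))) = 0 := by
        simp only [List.countP_singleton]
        simp; omega
      omega
    · have hbn : b = n + 1 := by omega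
      subst hbn
      have h1 : (List.range n).countP (fun p => decide (a ≤ p ∧ p < n + 1))
          = (List.range n).countP (fun p => decide (a ≤ p ∧ p < n)) := by
        apply List.countP_congr
        intro x hx
        simp only [List.mem_range] at hx
        simp; omega
      have h2 := ih n (Nat.le_refl n)
      rcases Nat.lt_or_ge n a with ha | ha
      · have h3 : ([n].countP (fun p => decide (a ≤ p ∧ p < n + 1))) = 0 := by
          simp only [List.countP_singleton]; simp; omega
        omega
      · have h3 : ([n].countP (fun p => decide (a ≤ p ∧ p < n + 1))) = 1 := by
          simp only [List.countP_singleton]; simp; omega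
        omega

-- splitting a count along a disjoint cover of the predicate
theorem countP_split {α : Type} (l : List α) (f g₁ g₂ : α → Bool)
    (hcov : ∀ x ∈ l, f x = (g₁ x || g₂ x)) (hdis : ∀ x ∈ l, ¬(g₁ x = true ∧ g₂ x = true)) :
    l.countP f = l.countP g₁ + l.countP g₂ := by
  induction l with
  | nil => simp
  | cons a t ih =>
    have hf := hcov a (List.mem_cons_self)
    have hd := hdis a (List.mem_cons_self)
    have ih' := ih (fun x hx => hcov x (List.mem_cons_of_mem a hx))
      (fun x hx => hdis x (List.mem_cons_of_mem a hx))
    simp only [List.countP_cons, ih', hf]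
    cases hg1 : g₁ a <;> cases hg2 : g₂ a <;> simp [hg1, hg2] at * <;> omega

-- membership of the wall list
theorem mem_walls (h : List Int) (q : Nat) :
    q ∈ (List.range h.length).filter (fun i => decide (1 ≤ h.getD i 0)) ↔
      q < h.length ∧ 1 ≤ h.getD q 0 := by
  simp [List.mem_filter]

theorem walls_pairwise (h : List Int) :
    ((List.range h.length).filter (fun i => decide (1 ≤ h.getD i 0))).Pairwise (· < ·) :=
  List.Pairwise.filter _ List.pairwise_lt_range

-- the core invariant of A's outer loop
theorem pyOuter_eq (h : List Int) (u : Int) :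
    ∀ k c i j, h.length - i ≤ k → i ≤ h.length → j ≤ i + 1 →
      pyOuter h u c i j = c + (pvN h i : Int) * u := by
  intro k
  induction k with
  | zero =>
    intro c i j hk hi hj
    have hieq : i = h.length := by omega
    subst hieq
    have hN : pvN h h.length = 0 := by
      unfold pvN
      rw [List.countP_eq_zero]
      intro p hp
      simp only [List.mem_range] at hp
      simp; omega
    rw [pyOuter]
    by_cases hg : j < h.length
    · rw [if_pos hg]
      have hrun : pyRunEnd h h.length = h.length := pyRunEnd_id h _ (Nat.le_refl _)
      rw [hrun]
      have hskip : pySkipLow h (h.length + 1) = h.length + 1 := pySkipLow_id h _ (by omega)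
      rw [hskip, dif_pos (Or.inl (by omega : h.length ≤ h.length + 1))]
      rw [hN]; ring
    · rw [if_neg hg, hN]; ring
  | succ k ih =>
    intro c i j hk hi hj
    rw [pyOuter]
    by_cases hg : j < h.length
    · rw [if_pos hg]
      by_cases hilt : i < h.length
      · set i' := pyRunEnd h i with hi'def
        set jf := pySkipLow h (i' + 1) with hjfdef
        have hii' : i ≤ i' := pyRunEnd_ge h i
        have hjfge : i' + 1 ≤ jf := pySkipLow_ge h (i' + 1)
        have hi'lt : i' < h.length := pyRunEnd_lt h i hilt
        have hjfle : jf ≤ h.length := pySkipLow_le h (i' + 1) (by omega)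
        by_cases hend : h.length ≤ jf
        · rw [dif_pos (Or.inl hend)]
          have hN : pvN h i = 0 := by
            unfold pvN
            rw [List.countP_eq_zero]
            intro p hp
            simp only [List.mem_range] at hp
            simp only [decide_eq_true_eq, not_and]
            intro hip hlow
            rintro ⟨q, hqn, hpq, hqw⟩
            -- every wall strictly above i lies in (i, i']
            have hqle : q ≤ i' := by
              by_contra hq'
              have : h.getD q 0 < 1 := pySkipLow_low h (i' + 1) q (by omega) (by omega)
              omega
            -- so p itself is in (i, i'] and is a wall, contradiction
            have : 0 < h.getD p 0 := pyRunEnd_wall h i p hip (by omega)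
            omega
          rw [hN]; ring
        · have hwjf : 1 ≤ h.getD jf 0 := pySkipLow_wall h (i' + 1) (by omega)
          rw [dif_neg (by simp only [not_or, not_le]; exact ⟨by omega, by omega⟩ :
            ¬(h.length ≤ jf ∨ h.getD jf 0 < 1))]
          have hrec := ih (c + ((jf : Int) - (i' : Int) - 1) * u) jf (jf + 1)
            (by omega) (by omega) (by omega)
          rw [hrec]
          -- pvN h i = (jf - i' - 1) + pvN h jf
          have hsplit : pvN h i = (jf - (i' + 1)) + pvN h jf := by
            unfold pvN
            rw [countP_split (List.range h.length)
              (fun p => decide (i < p ∧ h.getD p 0 < 1 ∧ ∃ q, q < h.length ∧ p < q ∧ 1 ≤ h.getD q 0))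
              (fun p => decide (i' + 1 ≤ p ∧ p < jf))
              (fun p => decide (jf < p ∧ h.getD p 0 < 1 ∧ ∃ q, q < h.length ∧ p < q ∧ 1 ≤ h.getD q 0))]
            · rw [countP_range_Ico h.length (i' + 1) jf (by omega)]
            · intro p hp
              simp only [List.mem_range] at hp
              rw [← Bool.decide_or, decide_eq_decide]
              constructor
              · rintro ⟨hip, hlow, q, hqn, hpq, hqw⟩
                have hpi' : i' < p := by
                  by_contra hpc
                  have : 0 < h.getD p 0 := pyRunEnd_wall h i p hip (by omega)
                  omega
                rcases Nat.lt_trichotomy p jf with hpjf | hpjf | hpjf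
                · left; exact ⟨by omega, hpjf⟩
                · subst hpjf; omega
                · right; exact ⟨hpjf, hlow, q, hqn, hpq, hqw⟩
              · rintro (⟨hp1, hp2⟩ | ⟨hp1, hp2, hex⟩)
                · refine ⟨by omega, pySkipLow_low h (i' + 1) p hp1 hp2, jf, by omega, hp2, hwjf⟩
                · exact ⟨by omega, hp2, hex⟩
            · intro p hp
              simp only [decide_eq_true_eq]
              rintro ⟨⟨_, h1⟩, ⟨h2, _⟩⟩
              omega
          rw [hsplit]
          have hcast : ((jf - (i' + 1) : Nat) : Int) = (jf : Int) - (i' : Int) - 1 := by omega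
          rw [Nat.cast_add, hcast]
          ring
      · -- i = h.length
        have hieq : i = h.length := by omega
        subst hieq
        rw [pyRunEnd_id h h.length (Nat.le_refl _), pySkipLow_id h (h.length + 1) (by omega)]
        rw [dif_pos (Or.inl (by omega : h.length ≤ h.length + 1))]
        have hN : pvN h h.length = 0 := by
          unfold pvN
          rw [List.countP_eq_zero]
          intro p hp
          simp only [List.mem_range] at hp
          simp; omega
        rw [hN]; ring
    · rw [if_neg hg]
      have hN : pvN h i = 0 := by
        unfold pvN
        rw [List.countP_eq_zero]
        intro p hp
        simp only [List.mem_range] at hp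
        simp; omega
      rw [hN]; ring

-- ===== VERDICT (by name: the statement is the Claim_ definition above) =====
theorem countLayer1_spec : Claim_equal_countLayer1 := by
  intro height unitDepth _
  unfold Spec_countLayer1 countLayer1
  have halt : countLayer1_alt height unitDepth =
      (if ((List.range height.length).filter (fun i => decide (1 ≤ height.getD i 0))).length < 2 then 0
       else ((((List.range height.length).filter (fun i => decide (1 ≤ height.getD i 0))).getLastD 0 : Int)
         - (((List.range height.length).filter (fun i => decide (1 ≤ height.getD i 0))).headD 0 : Int)
         - ((((List.range height.length).filter (fun i => decide (1 ≤ height.getD i 0))).length : Int) - 1)) * unitDepth) := rfl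
  rw [halt]
  generalize hWd : (List.range height.length).filter (fun i => decide (1 ≤ height.getD i 0)) = W
  have hmemW : ∀ q, q ∈ W ↔ q < height.length ∧ 1 ≤ height.getD q 0 := by
    rw [← hWd]; exact mem_walls height
  have hpwW : W.Pairwise (· < ·) := hWd ▸ walls_pairwise height
  have hWlen_le : W.length ≤ height.length := by
    rw [← hWd]
    calc ((List.range height.length).filter (fun i => decide (1 ≤ height.getD i 0))).length
        ≤ (List.range height.length).length := List.length_filter_le _ _
      _ = height.length := List.length_range
  by_cases hlen : height.length < 2
  · rw [if_pos hlen, if_pos (by omega : W.length < 2)]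
  · rw [if_neg hlen]
    set i0 := pySkipLow height 0 with hi0
    have hi0le : i0 ≤ height.length := pySkipLow_le height 0 (Nat.zero_le _)
    rw [pyOuter_eq height unitDepth (height.length - i0) 0 i0 1 (Nat.le_refl _) hi0le (by omega)]
    by_cases hWlen : W.length < 2
    · rw [if_pos hWlen]
      have hN : pvN height i0 = 0 := by
        unfold pvN
        rw [List.countP_eq_zero]
        intro p hp
        simp only [List.mem_range] at hp
        simp only [decide_eq_true_eq, not_and]
        intro hip hlow
        rintro ⟨q, hqn, hpq, hqw⟩
        have hqW : q ∈ W := (hmemW q).mpr ⟨hqn, hqw⟩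
        have hi0lt : i0 < height.length := by omega
        have hi0w : 1 ≤ height.getD i0 0 := pySkipLow_wall height 0 hi0lt
        have hi0W : i0 ∈ W := (hmemW i0).mpr ⟨hi0lt, hi0w⟩
        cases W with
        | nil => simp at hqW
        | cons a t =>
          cases t with
          | cons b t' => simp at hWlen
          | nil =>
            simp only [List.mem_singleton] at hqW hi0W
            omega
      rw [hN]; ring
    · rw [if_neg hWlen]
      have hW2 : 2 ≤ W.length := by omega
      obtain ⟨w0, t, hWc⟩ : ∃ w0 t, W = w0 :: t := by
        cases W with
        | nil => simp at hW2
        | cons a t => exact ⟨a, t, rfl⟩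
      have hWne : W ≠ [] := by rw [hWc]; simp
      have hLne : W.getLast? ≠ none := by
        simp only [ne_eq, List.getLast?_eq_none_iff]
        exact hWne
      obtain ⟨L, hLsome⟩ := Option.ne_none_iff_exists'.mp hLne
      obtain ⟨W', hWdec⟩ := List.getLast?_eq_some_iff.mp hLsome
      obtain ⟨t', ht'⟩ : ∃ t', t = t' ++ [L] := by
        cases W' with
        | nil => rw [hWdec] at hW2; simp at hW2
        | cons a u =>
          rw [hWc] at hWdec
          simp only [List.cons_append, List.cons.injEq] at hWdec
          exact ⟨u, hWdec.2⟩
      have hform : W = (w0 :: t') ++ [L] := by rw [hWc, ht']; rfl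
      have hLmem : L ∈ W := by rw [hform]; simp
      have hLp := (hmemW L).mp hLmem
      have hw0mem : w0 ∈ W := by rw [hWc]; exact List.mem_cons_self
      have hw0p := (hmemW w0).mp hw0mem
      have hpw2 := hform ▸ hpwW
      have hpwparts := List.pairwise_append.mp hpw2
      have hw0L : w0 < L := by
        have := hpwparts.2.2 w0 (List.mem_cons_self) L (List.mem_singleton_self L)
        exact this
      have ht'lt : ∀ x ∈ t', x < L := fun x hx =>
        hpwparts.2.2 x (List.mem_cons_of_mem w0 hx) L (List.mem_singleton_self L)
      have ht'gt : ∀ x ∈ t', w0 < x := fun x hx =>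
        (List.pairwise_cons.mp hpwparts.1).1 x hx
      have hmax : ∀ x ∈ W, x ≤ L := by
        intro x hx
        rw [hform] at hx
        rcases List.mem_append.mp hx with hx' | hx'
        · exact Nat.le_of_lt (hpwparts.2.2 x hx' L (List.mem_singleton_self L))
        · simp only [List.mem_singleton] at hx'; omega
      have hmin : ∀ x ∈ W, w0 ≤ x := by
        intro x hx
        rw [hWc] at hx
        rcases List.mem_cons.mp hx with rfl | hx'
        · exact Nat.le_refl _
        · have hpc := List.pairwise_cons.mp (hWc ▸ hpwW)
          exact Nat.le_of_lt (hpc.1 x hx')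
      -- i0 is the first wall, i.e. w0
      have hi0lt : i0 < height.length := by
        by_contra hcon
        have hlow : height.getD w0 0 < 1 :=
          pySkipLow_low height 0 w0 (Nat.zero_le _) (by omega)
        omega
      have hi0w : 1 ≤ height.getD i0 0 := pySkipLow_wall height 0 hi0lt
      have hi0W : i0 ∈ W := (hmemW i0).mpr ⟨hi0lt, hi0w⟩
      have hw0i0 : i0 = w0 := by
        have h1 : w0 ≤ i0 := hmin i0 hi0W
        have h2 : ¬(w0 < i0) := by
          intro hcl
          have hlow : height.getD w0 0 < 1 := pySkipLow_low height 0 w0 (Nat.zero_le _) hcl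
          omega
        omega
      -- the counting identities
      have hIco : (List.range height.length).countP (fun p => decide (w0 + 1 ≤ p ∧ p < L))
          = L - (w0 + 1) := countP_range_Ico height.length (w0 + 1) L (by omega)
      have hpvN : pvN height w0 = (List.range height.length).countP
          (fun p => decide (w0 < p ∧ height.getD p 0 < 1 ∧ ∃ q, q < height.length ∧ p < q ∧ 1 ≤ height.getD q 0)) := rfl
      have hsplit : (List.range height.length).countP (fun p => decide (w0 + 1 ≤ p ∧ p < L)) =
          (List.range height.length).countP
            (fun p => decide (1 ≤ height.getD p 0) && decide (w0 < p ∧ p < L))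
          + pvN height w0 := by
        rw [hpvN]
        rw [countP_split (List.range height.length)
          (fun p => decide (w0 + 1 ≤ p ∧ p < L))
          (fun p => decide (1 ≤ height.getD p 0) && decide (w0 < p ∧ p < L))
          (fun p => decide (w0 < p ∧ height.getD p 0 < 1 ∧ ∃ q, q < height.length ∧ p < q ∧ 1 ≤ height.getD q 0))]
        · intro p hp
          simp only [List.mem_range] at hp
          rw [← Bool.decide_and, ← Bool.decide_or, decide_eq_decide]
          constructor
          · rintro ⟨h1, h2⟩
            by_cases hwp : 1 ≤ height.getD p 0
            · left; exact ⟨hwp, by omega, h2⟩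
            · right; exact ⟨by omega, by omega, L, hLp.1, h2, hLp.2⟩
          · rintro (⟨_, h1, h2⟩ | ⟨h1, h2, q, hqn, hpq, hqw⟩)
            · exact ⟨by omega, h2⟩
            · have hqW : q ∈ W := (hmemW q).mpr ⟨hqn, hqw⟩
              have := hmax q hqW
              exact ⟨by omega, by omega⟩
        · intro p hp
          simp only [Bool.and_eq_true, decide_eq_true_eq]
          rintro ⟨⟨h1, _⟩, ⟨_, h2, _⟩⟩
          omega
      have hmid : (List.range height.length).countP
          (fun p => decide (1 ≤ height.getD p 0) && decide (w0 < p ∧ p < L)) = W.length - 2 := by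
        have hcf : (List.range height.length).countP
            (fun p => decide (1 ≤ height.getD p 0) && decide (w0 < p ∧ p < L))
            = W.countP (fun p => decide (w0 < p ∧ p < L)) := by
          rw [← hWd, List.countP_filter]
          apply List.countP_congr
          intro x _
          rw [Bool.and_comm]
        rw [hcf, hform]
        rw [List.countP_append, List.countP_cons, List.countP_singleton]
        have hcd : t'.countP (fun p => decide (w0 < p ∧ p < L)) = t'.length := by
          rw [List.countP_eq_length]
          intro x hx
          simp only [decide_eq_true_eq]
          exact ⟨ht'gt x hx, ht'lt x hx⟩
        have hlen2 : W.length = t'.length + 2 := by rw [hform]; simp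
        simp only [decide_eq_true_eq]
        rw [hcd]
        rw [if_neg (by omega : ¬(w0 < w0 ∧ w0 < L)), if_neg (by omega : ¬(w0 < L ∧ L < L))]
        simp only [List.length_append, List.length_cons, List.length_nil] at hlen2 ⊢
        omega
      have hhead : W.headD 0 = w0 := by rw [hWc]; rfl
      have hlastD : W.getLastD 0 = L := by
        simp [List.getLastD_eq_getLast?, hLsome]
      rw [hhead, hlastD, hw0i0]
      have key : (pvN height w0 : Int) = (L : Int) - (w0 : Int) - ((W.length : Int) - 1) := by
        omega
      rw [key]
      ring
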